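-- pv_equiv track=rewrite | github.com/mmmdip/VisitRecommender | project2.py | build_itemDict
-- ===== SOURCE A (Python) =====
-- def build_itemDict( stateInfo ):
--     itemList = []
--     for items in stateInfo.values():
--         for item in items:
--             if item not in itemList:
--                 itemList.append( item )
--     itemDict = {}
--     for item in itemList:
--         states = []
--         for state in stateInfo:
--             if item in stateInfo[state]:
--                 states.append( state )
--         itemDict[item] = states
--     return itemDict
-- ===== SOURCE B (Python) =====
-- def build_itemDict(stateInfo):
--     itemDict = {}
--     for state, items in stateInfo.items():
--         for item in dict.fromkeys(items):
--             itemDict.setdefault(item, []).append(state)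
--     return itemDict
-- ===== Notes on version B (the rewrite author's own statement) =====
-- stated objective: faster
-- what changed: Replaces the quadratic two-phase scheme (dedup items by linear list membership, then rescan every state per item) by one pass over the dict that groups states per item via setdefault, deduplicating each state's items with dict.fromkeys.
import Mathlib
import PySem

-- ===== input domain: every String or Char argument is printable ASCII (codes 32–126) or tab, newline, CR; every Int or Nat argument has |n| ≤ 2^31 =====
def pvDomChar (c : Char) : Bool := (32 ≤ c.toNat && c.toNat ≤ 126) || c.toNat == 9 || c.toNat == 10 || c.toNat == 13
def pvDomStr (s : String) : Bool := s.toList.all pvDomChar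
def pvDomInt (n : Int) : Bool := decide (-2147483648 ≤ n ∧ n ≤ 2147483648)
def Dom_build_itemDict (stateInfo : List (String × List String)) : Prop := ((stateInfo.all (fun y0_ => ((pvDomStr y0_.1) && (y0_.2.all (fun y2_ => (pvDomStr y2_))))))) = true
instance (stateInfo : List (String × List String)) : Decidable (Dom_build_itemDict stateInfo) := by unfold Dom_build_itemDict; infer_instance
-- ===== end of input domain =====

-- B makes one pass over the dict, grouping states per item with setdefault (items deduplicated per state
-- by dict.fromkeys), instead of A's two-phase scheme that dedups all items by linear list membership and
-- then rescans every state for every item; objective: faster.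

-- ===== PORT A =====
def build_itemDict (stateInfo : List (String × List String)) : List (String × List String) :=
  let d0 : PySem.Dict String (List String) := PySem.Dict.mk stateInfo
  let itemList : List String := d0.values.foldl (fun acc items =>
      items.foldl (fun acc item => if item ∈ acc then acc else acc ++ [item]) acc) []
  let itemDict : PySem.Dict String (List String) := itemList.foldl (fun d item =>
      -- 'stateInfo[state]' always succeeds here (state ranges over the keys); getD with [] is exact
      let states : List String := d0.keys.foldl (fun sts state =>
          if item ∈ d0.getD state [] then sts ++ [state] else sts) []
      d.insert item states) PySem.Dict.empty
  itemDict.items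

-- ===== PORT B =====
def build_itemDict_alt (stateInfo : List (String × List String)) : List (String × List String) :=
  (stateInfo.foldl (fun d p =>
      (PySem.List.dedup p.2).foldl (fun d item => d.modify item [] (fun l => l ++ [p.1])) d)
    (PySem.Dict.empty : PySem.Dict String (List String))).items

-- ===== PRECONDITION & SPEC =====
-- Pre_ excludes association lists with duplicate state keys: they do not represent any Python dict
-- input (the Python function takes a dict, whose keys are necessarily unique), so no input the
-- Python A runs on is excluded.
def Pre_build_itemDict (stateInfo : List (String × List String)) : Prop :=
  (stateInfo.map Prod.fst).Nodup
instance (stateInfo : List (String × List String)) : Decidable (Pre_build_itemDict stateInfo) := by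
  unfold Pre_build_itemDict; infer_instance

def pvWitness_build_itemDict : (List (String × List String)) :=
  [("CA", ["museum", "park"]), ("NY", ["park", "zoo", "park"])]

def Spec_build_itemDict (stateInfo : List (String × List String)) (out : List (String × List String)) : Prop := out = build_itemDict_alt stateInfo
instance (stateInfo : List (String × List String)) (out : List (String × List String)) : Decidable (Spec_build_itemDict stateInfo out) := by unfold Spec_build_itemDict; infer_instance

-- ===== CLAIM (what is proved, stated in full; the proofs are below) =====
def Claim_equal_build_itemDict : Prop := ∀ (stateInfo : List (String × List String)), Dom_build_itemDict stateInfo → Pre_build_itemDict stateInfo → Spec_build_itemDict stateInfo (build_itemDict stateInfo)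

-- ===== LEMMAS AND PROOFS =====

-- the canonical value: the states (in order) whose item list contains `item`
def statesOf (stateInfo : List (String × List String)) (item : String) : List String :=
  (stateInfo.filter (fun p => decide (item ∈ p.2))).map (fun p => p.1)

theorem update_ofList {s : PySem.Set String} {xs : List String} :
    PySem.Set.update s (PySem.Set.ofList xs) = PySem.Set.update s xs := by
  rw [PySem.Set.update_eq_append_filter, PySem.Set.update_eq_append_filter,
    PySem.Set.ofList_ofList]

theorem foldl_ite_eq_update (xs : List String) (s : PySem.Set String) :
    xs.foldl (fun acc item => if item ∈ acc then acc else acc ++ [item]) s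
      = PySem.Set.update s xs := by
  rw [PySem.List.foldl_congr_mem' xs _ (fun acc x => PySem.Set.add acc x) s
    (fun x _ acc => (PySem.Set.add_eq_ite acc x).symm)]
  rfl

theorem foldl_update_eq_update_flatMap (ll : List (String × List String)) (s : PySem.Set String) :
    ll.foldl (fun acc p => PySem.Set.update acc p.2) s
      = PySem.Set.update s (ll.flatMap (fun p => p.2)) := by
  induction ll generalizing s with
  | nil => rfl
  | cons p rest ih => rw [List.flatMap_cons, PySem.Set.update_append, List.foldl_cons, ih]

theorem update_flatMap_ofList (ll : List (String × List String)) (s : PySem.Set String) :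
    PySem.Set.update s (ll.flatMap (fun p => PySem.Set.ofList p.2))
      = PySem.Set.update s (ll.flatMap (fun p => p.2)) := by
  induction ll generalizing s with
  | nil => rfl
  | cons p rest ih =>
      rw [List.flatMap_cons, List.flatMap_cons, PySem.Set.update_append,
        PySem.Set.update_append, update_ofList, ih]

-- B's flattened pair stream and its value at each item
theorem filter_flat_eq_statesOf (stateInfo : List (String × List String)) (item : String) :
    ((stateInfo.flatMap (fun p => (PySem.Set.ofList p.2).map (fun it => (it, p.1)))).filter
        (fun q => q.1 == item)).map (fun q => q.2)
      = statesOf stateInfo item := by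
  induction stateInfo with
  | nil => rfl
  | cons p rest ih =>
      rw [List.flatMap_cons, List.filter_append, List.map_append, ih]
      have hhead : (((PySem.Set.ofList p.2).map (fun it => (it, p.1))).filter
          (fun q => q.1 == item)).map (fun q : String × String => q.2)
          = if item ∈ p.2 then [p.1] else [] := by
        rw [List.filter_map]
        have : ((fun q : String × String => q.1 == item) ∘ (fun it => (it, p.1)))
            = fun it => it == item := rfl
        rw [this, List.filter_beq]
        by_cases h : item ∈ p.2
        · rw [List.count_eq_one_of_mem (PySem.Set.nodup_ofList _) ((PySem.Set.mem_ofList _ _).2 h)]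
          simp [h]
        · rw [List.count_eq_zero_of_not_mem (fun hc => h ((PySem.Set.mem_ofList _ _).1 hc))]
          simp [h]
      rw [hhead]
      unfold statesOf
      by_cases h : item ∈ p.2 <;> simp [h]

theorem build_itemDict_alt_eq (stateInfo : List (String × List String)) :
    build_itemDict_alt stateInfo
      = (PySem.Set.ofList (stateInfo.flatMap (fun p => p.2))).map
          (fun it => (it, statesOf stateInfo it)) := by
  unfold build_itemDict_alt
  have hflat : (stateInfo.foldl (fun d p =>
        (PySem.List.dedup p.2).foldl (fun d item => d.modify item [] (fun l => l ++ [p.1])) d)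
      (PySem.Dict.empty : PySem.Dict String (List String)))
      = (stateInfo.flatMap (fun p => (PySem.Set.ofList p.2).map (fun it => (it, p.1)))).foldl
          (fun d q => d.modify q.1 [] (fun l => l ++ [q.2]))
          (PySem.Dict.empty : PySem.Dict String (List String)) := by
    rw [List.foldl_flatMap]
    refine PySem.List.foldl_congr_mem' _ _ _ _ (fun p _ d => ?_)
    rw [PySem.List.dedup_eq_ofList, List.foldl_map]
  rw [hflat]
  set flat := stateInfo.flatMap (fun p => (PySem.Set.ofList p.2).map (fun it => (it, p.1))) with hflatdef
  set dB := flat.foldl (fun d q => d.modify q.1 [] (fun l => l ++ [q.2]))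
      (PySem.Dict.empty : PySem.Dict String (List String)) with hdB
  have hkeys : dB.keys = PySem.Set.ofList (stateInfo.flatMap (fun p => p.2)) := by
    rw [hdB, PySem.Dict.keys_foldl_modify_key flat (fun q => q.1) []
      (fun _ q => (fun l => l ++ [q.2]))]
    have hmap : flat.map (fun q => q.1) = stateInfo.flatMap (fun p => PySem.Set.ofList p.2) := by
      rw [hflatdef, List.map_flatMap]
      simp [Function.comp_def]
    rw [hmap, PySem.Dict.keys_empty, update_flatMap_ofList, PySem.Set.update_nil_left]
  have hnodup : dB.keys.Nodup := by rw [hkeys]; exact PySem.Set.nodup_ofList _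
  rw [PySem.Dict.items_eq_map_keys dB hnodup [], hkeys]
  refine List.map_congr_left (fun it _ => ?_)
  rw [hdB, PySem.Dict.getD_foldl_modify_append flat _ it, PySem.Dict.getD_empty,
    List.nil_append, filter_flat_eq_statesOf]

theorem build_itemDict_eq (stateInfo : List (String × List String))
    (h : Pre_build_itemDict stateInfo) :
    build_itemDict stateInfo
      = (PySem.Set.ofList (stateInfo.flatMap (fun p => p.2))).map
          (fun it => (it, statesOf stateInfo it)) := by
  unfold build_itemDict
  simp only []
  have hkeysd0 : (PySem.Dict.mk stateInfo).keys = stateInfo.map (fun p => p.1) := rfl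
  have hvalsd0 : (PySem.Dict.mk stateInfo).values = stateInfo.map (fun p => p.2) := rfl
  have hnodup0 : (PySem.Dict.mk stateInfo).keys.Nodup := h
  -- the deduplicated item list
  have hitemList : (List.foldl (fun acc items =>
        items.foldl (fun acc item => if item ∈ acc then acc else acc ++ [item]) acc)
        [] (PySem.Dict.mk stateInfo).values)
      = PySem.Set.ofList (stateInfo.flatMap (fun p => p.2)) := by
    rw [hvalsd0, List.foldl_map]
    rw [PySem.List.foldl_congr_mem' stateInfo _ (fun acc p => PySem.Set.update acc p.2) []
      (fun p _ acc => foldl_ite_eq_update p.2 acc)]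
    rw [foldl_update_eq_update_flatMap, PySem.Set.update_nil_left]
  rw [hitemList]
  -- each item's state list
  have hstates : ∀ item : String,
      (List.foldl (fun sts state =>
          if item ∈ (PySem.Dict.mk stateInfo).getD state [] then sts ++ [state] else sts)
        [] (PySem.Dict.mk stateInfo).keys) = statesOf stateInfo item := by
    intro item
    rw [hkeysd0, List.foldl_map]
    rw [PySem.List.foldl_congr_mem' stateInfo _
      (fun sts p => if item ∈ p.2 then sts ++ [p.1] else sts) []
      (fun p hp sts => by
        rw [PySem.Dict.getD_of_mem_items (PySem.Dict.mk stateInfo)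
          (show (p.1, p.2) ∈ (PySem.Dict.mk stateInfo).items from hp) hnodup0 []])]
    have := PySem.List.foldl_append_if (fun p : String × List String => decide (item ∈ p.2))
      (fun p => p.1) stateInfo []
    simp only [decide_eq_true_eq] at this
    rw [this, List.nil_append]
    rfl
  rw [PySem.List.foldl_congr_mem' _ _
    (fun d item => PySem.Dict.insert d item (statesOf stateInfo item)) PySem.Dict.empty
    (fun item _ d => by rw [hstates item])]
  rw [PySem.Dict.items_foldl_insert_fresh _ (fun it => it) (fun it => statesOf stateInfo it)
    PySem.Dict.empty (fun a _ => PySem.Dict.contains_empty a)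
    (by simp only [List.map_id_fun', id]; exact PySem.Set.nodup_ofList (stateInfo.flatMap (fun p => p.2)))]
  rfl

-- ===== VERDICT (by name: the statement is the Claim_ definition above) =====
theorem build_itemDict_spec : Claim_equal_build_itemDict := by
  intro stateInfo _ hpre
  unfold Spec_build_itemDict
  rw [build_itemDict_eq stateInfo hpre, build_itemDict_alt_eq stateInfo]
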